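-- pv_equiv track=rewrite | github.com/Nihtt2/ysc_rtk | route_segment_planner.py | _backward_indices
-- ===== SOURCE A (Python) =====
-- def _backward_indices(start_idx, end_idx, n, is_loop):
--     if is_loop:
--         out = [start_idx]
--         i = start_idx
--         while i != end_idx:
--             i = (i - 1 + n) % n
--             out.append(i)
--         return out
--     if start_idx >= end_idx:
--         return list(range(start_idx, end_idx - 1, -1))
--     return []
-- ===== SOURCE B (Python) =====
-- def _backward_indices(start_idx, end_idx, n, is_loop):
--     if is_loop:
--         if start_idx == end_idx:
--             return [start_idx]
--         steps = (start_idx - end_idx - 1) % abs(n) + 1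
--         return [start_idx] + [(start_idx - k) % n for k in range(1, steps + 1)]
--     if start_idx >= end_idx:
--         return list(range(start_idx, end_idx - 1, -1))
--     return []
-- ===== Notes on version B (the rewrite author's own statement) =====
-- stated objective: alternative
-- what changed: The is_loop while loop that decrements modulo n until it meets end_idx is replaced by a closed-form trip count steps = (start_idx - end_idx - 1) % abs(n) + 1 and a direct comprehension of the wrapped indices (start_idx - k) % n, with the start == end case returned immediately; the non-loop branches are unchanged.
import Mathlib
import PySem

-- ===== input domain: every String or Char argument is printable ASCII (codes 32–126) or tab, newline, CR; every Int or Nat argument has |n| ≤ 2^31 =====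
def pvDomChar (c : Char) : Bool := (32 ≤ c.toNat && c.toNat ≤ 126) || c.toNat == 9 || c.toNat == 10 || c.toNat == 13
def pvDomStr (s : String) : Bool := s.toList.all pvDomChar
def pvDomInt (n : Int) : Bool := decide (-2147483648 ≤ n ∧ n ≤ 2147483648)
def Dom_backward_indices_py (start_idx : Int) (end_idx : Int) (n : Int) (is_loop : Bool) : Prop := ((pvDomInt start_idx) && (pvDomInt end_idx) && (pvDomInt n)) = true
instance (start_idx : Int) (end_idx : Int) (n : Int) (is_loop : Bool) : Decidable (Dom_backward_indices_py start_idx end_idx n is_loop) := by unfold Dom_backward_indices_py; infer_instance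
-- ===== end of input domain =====

-- B replaces A's decrement-and-test while loop by a closed-form trip count plus a direct
-- comprehension of the wrapped indices (objective: alternative decomposition, same cost).

-- ===== PORT A =====
-- A's while loop; the fuel argument only makes the recursion total (on Pre_ the loop
-- terminates within the supplied fuel, and fuel exhaustion returns like loop exit).
def pvAWhile : Nat → Int → Int → Int → List Int → List Int
  | 0, _, _, _, acc => acc.reverse
  | fuel+1, i, e, n, acc =>
    if i = e then acc.reverse
    else
      let i' := PySem.Int.mod (i - 1 + n) n
      pvAWhile fuel i' e n (i' :: acc)

def backward_indices_py (start_idx : Int) (end_idx : Int) (n : Int) (is_loop : Bool) : List Int :=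
  if is_loop then
    pvAWhile (n.natAbs + 1) start_idx end_idx n [start_idx]
  else if start_idx ≥ end_idx then
    PySem.List.pyRange start_idx (end_idx - 1) (-1)
  else []

-- ===== PORT B =====
def backward_indices_py_alt (start_idx : Int) (end_idx : Int) (n : Int) (is_loop : Bool) : List Int :=
  if is_loop then
    if start_idx = end_idx then [start_idx]
    else
      let steps : Int := PySem.Int.mod (start_idx - end_idx - 1) (Int.natAbs n : Int) + 1
      start_idx ::
        (PySem.List.pyRange 1 (steps + 1) 1).map (fun k => PySem.Int.mod (start_idx - k) n)
  else if start_idx ≥ end_idx then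
    PySem.List.pyRange start_idx (end_idx - 1) (-1)
  else []

-- ===== PRECONDITION & SPEC =====
-- Pre_ excludes only loop-branch inputs on which A never returns: n = 0 with
-- start ≠ end (ZeroDivisionError) and end_idx not a residue modulo n (infinite loop).
def Pre_backward_indices_py (start_idx : Int) (end_idx : Int) (n : Int) (is_loop : Bool) : Prop :=
  is_loop = true →
    (start_idx = end_idx ∨
      ((0 < n ∧ 0 ≤ end_idx ∧ end_idx < n) ∨ (n < 0 ∧ n < end_idx ∧ end_idx ≤ 0)))
instance (start_idx : Int) (end_idx : Int) (n : Int) (is_loop : Bool) : Decidable (Pre_backward_indices_py start_idx end_idx n is_loop) := by unfold Pre_backward_indices_py; infer_instance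

def pvWitness_backward_indices_py : Int × Int × Int × Bool := (5, 1, 4, true)

def Spec_backward_indices_py (start_idx : Int) (end_idx : Int) (n : Int) (is_loop : Bool) (out : List Int) : Prop := out = backward_indices_py_alt start_idx end_idx n is_loop
instance (start_idx : Int) (end_idx : Int) (n : Int) (is_loop : Bool) (out : List Int) : Decidable (Spec_backward_indices_py start_idx end_idx n is_loop out) := by unfold Spec_backward_indices_py; infer_instance

-- ===== CLAIM (what is proved, stated in full; the proofs are below) =====
def Claim_equal_backward_indices_py : Prop := ∀ (start_idx : Int) (end_idx : Int) (n : Int) (is_loop : Bool), Dom_backward_indices_py start_idx end_idx n is_loop → Pre_backward_indices_py start_idx end_idx n is_loop → Spec_backward_indices_py start_idx end_idx n is_loop (backward_indices_py start_idx end_idx n is_loop)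

-- ===== LEMMAS AND PROOFS =====

-- the Python-mod residue range determined by the divisor's sign
def pvInRange (e n : Int) : Prop :=
  (0 < n ∧ 0 ≤ e ∧ e < n) ∨ (n < 0 ∧ n < e ∧ e ≤ 0)

lemma pv_dvd_of_mod_eq (n a e : Int) (h : PySem.Int.mod a n = e) : n ∣ a - e := by
  refine ⟨PySem.Int.floordiv a n, ?_⟩
  have := PySem.Int.floordiv_mul_add_mod a n
  linarith [this, h]

lemma pv_mod_in_range (a n : Int) (hn : n ≠ 0) : pvInRange (PySem.Int.mod a n) n := by
  rcases lt_or_gt_of_ne hn with h | h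
  · exact Or.inr ⟨h, (PySem.Int.mod_neg_bounds a h).1, (PySem.Int.mod_neg_bounds a h).2⟩
  · exact Or.inl ⟨h, PySem.Int.mod_nonneg a h, PySem.Int.mod_lt a h⟩

lemma pv_mod_eq_of_range_dvd (a e n : Int) (hn : n ≠ 0) (hr : pvInRange e n)
    (hd : n ∣ a - e) : PySem.Int.mod a n = e := by
  have hd2 : n ∣ a - PySem.Int.mod a n := pv_dvd_of_mod_eq n a _ rfl
  have hdvd : n ∣ PySem.Int.mod a n - e := by
    have := hd.sub hd2
    have heq : (a - e) - (a - PySem.Int.mod a n) = PySem.Int.mod a n - e := by ring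
    rwa [heq] at this
  have habs : |PySem.Int.mod a n - e| < |n| := by
    rcases pv_mod_in_range a n hn with ⟨h1, h2, h3⟩ | ⟨h1, h2, h3⟩ <;>
      rcases hr with ⟨g1, g2, g3⟩ | ⟨g1, g2, g3⟩ <;>
      · rw [abs_lt]; constructor <;> [skip; skip] <;> first
          | (rw [abs_of_pos g1]; omega)
          | (rw [abs_of_neg g1]; omega)
  have : PySem.Int.mod a n - e = 0 :=
    Int.eq_zero_of_abs_lt_dvd ((abs_dvd n _).mpr hdvd) habs
  omega

lemma pv_mod_add_divisor (a n : Int) (hn : n ≠ 0) :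
    PySem.Int.mod (a + n) n = PySem.Int.mod a n := by
  refine pv_mod_eq_of_range_dvd _ _ _ hn (pv_mod_in_range a n hn) ?_
  have h1 : n ∣ a - PySem.Int.mod a n := pv_dvd_of_mod_eq n a _ rfl
  have : (a + n) - PySem.Int.mod a n = (a - PySem.Int.mod a n) + n := by ring
  rw [this]; exact h1.add (dvd_refl n)

lemma pv_mod_sub_mod (a b n : Int) (hn : n ≠ 0) :
    PySem.Int.mod (PySem.Int.mod a n - b) n = PySem.Int.mod (a - b) n := by
  refine pv_mod_eq_of_range_dvd _ _ _ hn (pv_mod_in_range (a - b) n hn) ?_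
  have h1 : n ∣ a - PySem.Int.mod a n := pv_dvd_of_mod_eq n a _ rfl
  have h2 : n ∣ (a - b) - PySem.Int.mod (a - b) n := pv_dvd_of_mod_eq n (a - b) _ rfl
  have heq : (PySem.Int.mod a n - b) - PySem.Int.mod (a - b) n
      = ((a - b) - PySem.Int.mod (a - b) n) - (a - PySem.Int.mod a n) := by ring
  rw [heq]; exact h2.sub h1

lemma pvAWhile_stop (f : Nat) (e n : Int) (acc : List Int) :
    pvAWhile f e e n acc = acc.reverse := by
  cases f with
  | zero => rfl
  | succ f => simp [pvAWhile]

lemma pvAWhile_spec (e n : Int) (hn : n ≠ 0) :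
    ∀ (t fuel : Nat) (i : Int) (acc : List Int),
      t + 1 ≤ fuel → i ≠ e →
      PySem.Int.mod (i - ((t : Int) + 1)) n = e →
      (∀ k : Nat, 1 ≤ k → k ≤ t → PySem.Int.mod (i - (k : Int)) n ≠ e) →
      pvAWhile fuel i e n acc =
        acc.reverse ++ (List.range (t + 1)).map (fun (k : Nat) => PySem.Int.mod (i - ((k : Int) + 1)) n) := by
  intro t
  induction t with
  | zero =>
    intro fuel i acc hfuel hne hhit _
    obtain ⟨f, rfl⟩ : ∃ f, fuel = f + 1 := ⟨fuel - 1, by omega⟩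
    have hstep : PySem.Int.mod (i - 1 + n) n = e := by
      have : PySem.Int.mod (i - 1 + n) n = PySem.Int.mod (i - 1) n := by
        have := pv_mod_add_divisor (i - 1) n hn
        simpa using this
      rw [this]
      simpa using hhit
    have h1 : PySem.Int.mod (i - 1) n = e := by simpa using hhit
    simp only [pvAWhile, if_neg hne]
    rw [hstep, pvAWhile_stop]
    simp [h1]
  | succ t ih =>
    intro fuel i acc hfuel hne hhit hmiss
    obtain ⟨f, rfl⟩ : ∃ f, fuel = f + 1 := ⟨fuel - 1, by omega⟩
    have hmodrw : PySem.Int.mod (i - 1 + n) n = PySem.Int.mod (i - 1) n := by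
      have := pv_mod_add_divisor (i - 1) n hn
      simpa using this
    set i' := PySem.Int.mod (i - 1) n with hi'
    have hshift : ∀ b : Int, PySem.Int.mod (i' - b) n = PySem.Int.mod (i - (b + 1)) n := by
      intro b
      rw [hi', pv_mod_sub_mod _ _ _ hn]
      congr 1; ring
    have hne' : i' ≠ e := by
      have h1 := hmiss 1 (by omega) (by omega)
      have : PySem.Int.mod (i - (1:Int)) n ≠ e := by simpa using h1
      rw [hi']; exact this
    have hhit' : PySem.Int.mod (i' - ((t : Int) + 1)) n = e := by
      rw [hshift]
      have : i - ((t : Int) + 1 + 1) = i - (((t : Nat) + 1 : Nat) + 1 : Int) := by push_cast; ring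
      rw [this]
      exact_mod_cast hhit
    have hmiss' : ∀ k : Nat, 1 ≤ k → k ≤ t → PySem.Int.mod (i' - (k : Int)) n ≠ e := by
      intro k h1 h2
      rw [hshift]
      have := hmiss (k + 1) (by omega) (by omega)
      have hc : i - ((k : Int) + 1) = i - ((k + 1 : Nat) : Int) := by push_cast; ring
      rw [hc]; exact this
    simp only [pvAWhile, if_neg hne, hmodrw]
    rw [ih f i' (i' :: acc) (by omega) hne' hhit' hmiss']
    have hsplit : (List.range (t + 1 + 1)).map (fun (k : Nat) => PySem.Int.mod (i - ((k : Int) + 1)) n)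
        = i' :: (List.range (t + 1)).map (fun (k : Nat) => PySem.Int.mod (i' - ((k : Int) + 1)) n) := by
      rw [List.range_succ_eq_map, List.map_cons, List.map_map]
      refine List.cons_eq_cons.mpr ⟨?_, ?_⟩
      · rw [hi']
        congr 1
      · apply List.map_congr_left
        intro k _
        simp only [Function.comp, Nat.succ_eq_add_one]
        rw [hshift]
        have hc2 : i - (((k + 1 : Nat) : Int) + 1) = i - ((k : Int) + 1 + 1) := by push_cast; ring
        rw [hc2]
    rw [hsplit, List.reverse_cons, List.append_assoc, List.singleton_append]

-- the loop branch of A equals the loop branch of B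
lemma pv_loop_eq (s e n : Int) (hne : s ≠ e)
    (hr : pvInRange e n) :
    pvAWhile (n.natAbs + 1) s e n [s] =
      s :: (PySem.List.pyRange 1 (PySem.Int.mod (s - e - 1) (Int.natAbs n : Int) + 1 + 1) 1).map
        (fun (k : Int) => PySem.Int.mod (s - k) n) := by
  have hn : n ≠ 0 := by rcases hr with ⟨h, _⟩ | ⟨h, _⟩ <;> omega
  have hm : (0:Int) < (Int.natAbs n : Int) := by
    have := Int.natAbs_pos.mpr hn; exact_mod_cast this
  set m : Int := (Int.natAbs n : Int) with hmdef
  set r : Int := PySem.Int.mod (s - e - 1) m with hrdef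
  have hr0 : 0 ≤ r := PySem.Int.mod_nonneg _ hm
  have hrm : r < m := PySem.Int.mod_lt _ hm
  set t : Nat := r.toNat with htdef
  have hrt : r = (t : Int) := by omega
  have hdvd_m : m ∣ (s - e - 1) - r := pv_dvd_of_mod_eq m _ _ rfl
  have habs : ∀ x : Int, (n ∣ x) ↔ (m ∣ x) := by
    intro x; rw [hmdef]; exact ⟨fun h => Int.natAbs_dvd.mpr h, fun h => Int.natAbs_dvd.mp h⟩
  have hhit : PySem.Int.mod (s - ((t : Int) + 1)) n = e := by
    apply pv_mod_eq_of_range_dvd _ _ _ hn hr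
    rw [habs]
    have heq : s - ((t : Int) + 1) - e = (s - e - 1) - r := by omega
    rw [heq]; exact hdvd_m
  have hmiss : ∀ k : Nat, 1 ≤ k → k ≤ t → PySem.Int.mod (s - (k : Int)) n ≠ e := by
    intro k h1 h2 hcon
    have hd : n ∣ s - (k : Int) - e := pv_dvd_of_mod_eq n _ _ hcon
    rw [habs] at hd
    have hd2 : m ∣ ((s - e - 1) - r) - (s - (k : Int) - e) := hdvd_m.sub hd
    have heq : ((s - e - 1) - r) - (s - (k : Int) - e) = (k : Int) - 1 - r := by ring
    rw [heq] at hd2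
    have hz : (k : Int) - 1 - r = 0 := by
      apply Int.eq_zero_of_abs_lt_dvd hd2
      rw [abs_lt]; omega
    omega
  rw [pvAWhile_spec e n hn t (n.natAbs + 1) s [s] (by omega) hne hhit hmiss]
  have hsteps : r + 1 + 1 - 1 = (t : Int) + 1 := by omega
  rw [PySem.List.pyRange_one]
  have hlen : (r + 1 + 1 - 1).toNat = t + 1 := by omega
  rw [hlen]
  simp only [List.reverse_singleton, List.singleton_append, List.map_map]
  congr 1
  apply List.map_congr_left
  intro k _
  simp only [Function.comp]
  congr 1; ring

-- ===== VERDICT (by name: the statement is the Claim_ definition above) =====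
theorem backward_indices_py_spec : Claim_equal_backward_indices_py := by
  intro s e n loop _ hpre
  unfold Spec_backward_indices_py backward_indices_py backward_indices_py_alt
  cases loop with
  | false => simp
  | true =>
    simp only [if_true]
    by_cases hse : s = e
    · subst hse
      simp [pvAWhile_stop]
    · have hr : pvInRange e n := by
        rcases hpre rfl with h | h
        · exact absurd h hse
        · exact h
      rw [if_neg hse]
      exact pv_loop_eq s e n hse hr
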